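-- pv_equiv track=rewrite | github.com/sergiomarques1/Projects | University Projects/Python/Projeto 2 TI (Gzip File Decompression)/gzip.py | converterComprimentos
-- ===== SOURCE A (Python) =====
-- def converterComprimentos(arrayComprimentos):
--
--     array = []      # Array que armazena os valores já convertidos
--     maxBits = max(arrayComprimentos)
--     count = [0]*(maxBits + 1)       # Array que armazena o número de vezes que ocorre um determinado comprimento de código
--     for valor in arrayComprimentos:
--         count[valor] += 1       # Incremento do contador do comprimento
--     count[0] = 0
--     codigo = 0
--     proxCodigo = [0]
--     for i in range(1, maxBits + 1):
--         codigo = (codigo + count[i-1]) << 1     # Deslocamento para a esquerda de um bit (multiplicação por 2) da soma entre o valor calculado anteriormente e o comprimento que lhe corresponde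
--         proxCodigo.append(codigo)
--     for i in range(len(arrayComprimentos)):
--         comprimento = arrayComprimentos[i]
--         array.append(proxCodigo[comprimento])       # Armazenamento do valor no índice correto do array de valores convertidos
--         if(comprimento > 0):
--             proxCodigo[comprimento] += 1        # Incremento do valor (caso o comprimento que lhe corresponde ocorra mais do que uma vez, o próximo valor é armazenado corretamente no array de valores convertidos ao ser incrementado)
--
--     return array
-- ===== SOURCE B (Python) =====
-- def converterComprimentos(arrayComprimentos):
--     res = [0] * len(arrayComprimentos)
--     code = 0
--     prev = 0
--     for l in sorted(set(x for x in arrayComprimentos if x > 0)):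
--         code <<= l - prev
--         for i, x in enumerate(arrayComprimentos):
--             if x == l:
--                 res[i] = code
--                 code += 1
--         prev = l
--     return res
-- ===== Notes on version B (the rewrite author's own statement) =====
-- stated objective: alternative
-- what changed: Replaces A's histogram array + precomputed next-code table + index-major pass (with in-place table increments) by a length-major sweep: sort the distinct positive lengths and, keeping one running code shifted left by the gap between consecutive lengths, scan the input once per distinct length assigning consecutive codes into the output at the original indices.
-- outside the precondition, e.g. on converterComprimentos([1, -1]): A returns [0, 1], B returns [0, 0]
import Mathlib
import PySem

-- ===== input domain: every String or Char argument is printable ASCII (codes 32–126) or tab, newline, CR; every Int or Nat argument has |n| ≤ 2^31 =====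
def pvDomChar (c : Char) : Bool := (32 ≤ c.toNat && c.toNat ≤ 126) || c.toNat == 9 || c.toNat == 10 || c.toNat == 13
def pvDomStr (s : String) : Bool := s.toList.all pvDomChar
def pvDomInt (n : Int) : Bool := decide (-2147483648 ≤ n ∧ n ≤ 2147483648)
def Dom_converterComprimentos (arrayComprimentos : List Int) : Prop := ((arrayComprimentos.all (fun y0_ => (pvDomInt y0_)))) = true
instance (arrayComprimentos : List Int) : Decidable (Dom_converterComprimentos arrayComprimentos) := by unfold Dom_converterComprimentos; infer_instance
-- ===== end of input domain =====

-- B replaces A's histogram + precomputed next-code table + index-major pass by a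
-- length-major sweep over the sorted distinct positive lengths (alternative algorithm,
-- similar cost); return value only, no argument is mutated by either version.


-- ===== PORT A =====
def converterComprimentos (arrayComprimentos : List Int) : List Int :=
  match PySem.List.max? arrayComprimentos (fun x => x) with
  | none => []  -- max([]) raises ValueError; excluded by Pre_, value never claimed
  | some maxBits =>
    let count0 := List.replicate (maxBits + 1).toNat (0 : Int)
    let count1 := arrayComprimentos.foldl
      (fun c valor => PySem.List.pySetD c valor (PySem.List.pyGetD c valor 0 + 1)) count0
    let count := PySem.List.pySetD count1 0 0
    let st := (PySem.List.pyRange 1 (maxBits + 1) 1).foldl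
      (fun (st : Int × List Int) i =>
        let codigo := (st.1 + PySem.List.pyGetD count (i - 1) 0) <<< (1 : Nat)
        (codigo, st.2 ++ [codigo])) (0, [0])
    let fin := (PySem.List.pyRange 0 (arrayComprimentos.length : Int) 1).foldl
      (fun (st : List Int × List Int) i =>
        let comprimento := PySem.List.pyGetD arrayComprimentos i 0
        ((st.1 ++ [PySem.List.pyGetD st.2 comprimento 0]),
         (if comprimento > 0 then
            PySem.List.pySetD st.2 comprimento (PySem.List.pyGetD st.2 comprimento 0 + 1)
          else st.2))) ([], st.2)
    fin.1

-- ===== PORT B =====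
def converterComprimentos_alt (arrayComprimentos : List Int) : List Int :=
  let lens := PySem.List.sorted
      (PySem.Set.ofList (arrayComprimentos.filter (fun x => decide (0 < x)))) (fun x => x) false
  (lens.foldl
    (fun (st : List Int × Int × Int) l =>
      let code := st.2.1 <<< (l - st.2.2).toNat
      let inner := (PySem.List.enumerate arrayComprimentos 0).foldl
        (fun (p : List Int × Int) ix =>
          if ix.2 == l then (PySem.List.pySetD p.1 ix.1 p.2, p.2 + 1) else p)
        (st.1, code)
      (inner.1, inner.2, l))
    (List.replicate arrayComprimentos.length (0 : Int), 0, 0)).1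

-- ===== PRECONDITION & SPEC =====
-- Pre_ excludes the empty list (A raises ValueError: max() of empty sequence) and lists
-- containing a negative entry (malformed input outside the natural domain of code lengths,
-- where A's negative-index wraparound yields accidental values).
def Pre_converterComprimentos (arrayComprimentos : List Int) : Prop :=
  arrayComprimentos ≠ [] ∧ ∀ x ∈ arrayComprimentos, 0 ≤ x
instance (arrayComprimentos : List Int) : Decidable (Pre_converterComprimentos arrayComprimentos) := by unfold Pre_converterComprimentos; infer_instance
def pvWitness_converterComprimentos : List Int := [3, 3, 3, 3, 3, 2, 4, 4]

def Spec_converterComprimentos (arrayComprimentos : List Int) (out : List Int) : Prop := out = converterComprimentos_alt arrayComprimentos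
instance (arrayComprimentos : List Int) (out : List Int) : Decidable (Spec_converterComprimentos arrayComprimentos out) := by unfold Spec_converterComprimentos; infer_instance

-- ===== CLAIM (what is proved, stated in full; the proofs are below) =====
def Claim_equal_converterComprimentos : Prop := ∀ (arrayComprimentos : List Int), Dom_converterComprimentos arrayComprimentos → Pre_converterComprimentos arrayComprimentos → Spec_converterComprimentos arrayComprimentos (converterComprimentos arrayComprimentos)

-- ===== LEMMAS AND PROOFS =====

-- The common specification: canonical-Huffman codes.
-- cntF a j = number of symbols of length j (length 0 discounted, as A zeroes count[0]);
-- ncF a j  = first code of length j; specAt a p x = code a symbol of length x gets when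
-- the symbols before it are p.
def cntF (a : List Int) (j : Nat) : Int := if j = 0 then 0 else (a.count (j : Int) : Int)

def ncF (a : List Int) : Nat → Int
  | 0 => 0
  | j + 1 => (ncF a (j) + cntF a (j)) * 2

def specAt (a p : List Int) (x : Int) : Int :=
  if 0 < x then ncF a x.toNat + (p.count x : Int) else 0

def specGo (a p : List Int) : List Int → List Int
  | [] => []
  | x :: r => specAt a p x :: specGo a (p ++ [x]) r


-- small getD facts used throughout
theorem getD_set_ne (l : List Int) (n j : Nat) (a : Int) (hne : j ≠ n) :
    (l.set n a).getD j 0 = l.getD j 0 := by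
  simp [List.getD_eq_getElem?_getD, List.getElem?_set_ne (by omega : n ≠ j)]

theorem getD_set_self (l : List Int) (n : Nat) (a : Int) (h : n < l.length) :
    (l.set n a).getD n 0 = a := by
  simp [List.getD_eq_getElem?_getD, h]

theorem getD_oob (l : List Int) (j : Nat) (h : l.length ≤ j) : l.getD j 0 = 0 := by
  simp [List.getD_eq_getElem?_getD, List.getElem?_eq_none (by omega)]

-- A's histogram loop: counts every value of the processed list
theorem hist_foldl (l : List Int) : ∀ (c : List Int),
    (∀ x ∈ l, 0 ≤ x ∧ x < (c.length : Int)) →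
    (l.foldl (fun c v => PySem.List.pySetD c v (PySem.List.pyGetD c v 0 + 1)) c).length = c.length ∧
    ∀ j : Nat, (l.foldl (fun c v => PySem.List.pySetD c v (PySem.List.pyGetD c v 0 + 1)) c).getD j 0
      = c.getD j 0 + (l.count (j : Int) : Int) := by
  induction l with
  | nil => intro c _; simp
  | cons v t ih =>
    intro c hc
    obtain ⟨hv0, hvlt⟩ := hc v (by simp)
    have hvn : v.toNat < c.length := by omega
    have hvc : v = ((v.toNat : Nat) : Int) := by omega
    have hset : PySem.List.pySetD c v (PySem.List.pyGetD c v 0 + 1)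
        = c.set v.toNat (c.getD v.toNat 0 + 1) := by
      rw [hvc, PySem.List.pySetD_natCast, PySem.List.pyGetD_natCast]
      simp [max_eq_left hv0]
    simp only [List.foldl_cons, hset]
    have hlen : (c.set v.toNat (c.getD v.toNat 0 + 1)).length = c.length := by simp
    obtain ⟨ih1, ih2⟩ := ih (c.set v.toNat (c.getD v.toNat 0 + 1))
      (by intro x hx; rw [hlen]; exact hc x (by simp [hx]))
    refine ⟨by rw [ih1, hlen], ?_⟩
    intro j
    rw [ih2 j]
    by_cases hj : j = v.toNat
    · subst hj
      rw [getD_set_self c _ _ hvn]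
      rw [← hvc]
      simp
      ring
    · rw [getD_set_ne c _ _ _ hj]
      have hne : ¬ v = (j : Int) := by omega
      simp [hne]


-- the next-code recurrence jumps over absent lengths
theorem nc_jump (a : List Int) : ∀ (v u : Nat), u < v →
    (∀ j : Nat, u < j → j < v → cntF a j = 0) →
    ncF a v = (ncF a u + cntF a u) * 2 ^ (v - u) := by
  intro v
  induction v with
  | zero => omega
  | succ w ih =>
    intro u hu hj
    by_cases hw : u = w
    · subst hw
      have h1 : u + 1 - u = 1 := by omega
      rw [h1]
      simp [ncF]
    · have hw' : u < w := by omega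
      have : ncF a (w + 1) = (ncF a w + cntF a w) * 2 := rfl
      rw [this, ih u hw' (fun j h1 h2 => hj j h1 (by omega)), hj w hw' (by omega)]
      have : w + 1 - u = (w - u) + 1 := by omega
      rw [this, pow_succ]
      ring

-- A's next-code table loop
theorem prox_fold (a cl : List Int)
    (hcl : ∀ j : Nat, cl.getD j 0 = cntF a j) : ∀ t : Nat,
    (PySem.List.pyRange 1 (((t : Nat) : Int) + 1) 1).foldl
      (fun (st : Int × List Int) i =>
        ((st.1 + PySem.List.pyGetD cl (i - 1) 0) <<< (1 : Nat),
         st.2 ++ [(st.1 + PySem.List.pyGetD cl (i - 1) 0) <<< (1 : Nat)]))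
      ((0 : Int), [(0 : Int)])
    = (ncF a t, (List.range (t + 1)).map (ncF a)) := by
  intro t
  induction t with
  | zero =>
    rw [PySem.List.pyRange_one_eq_nil (by omega : ((0:Nat):Int) + 1 ≤ 1)]
    simp [ncF]
  | succ w ih =>
    have hb : (1:Int) ≤ ((w : Nat) : Int) + 1 := by omega
    have hsplit : PySem.List.pyRange 1 (((w + 1 : Nat) : Int) + 1) 1
        = PySem.List.pyRange 1 (((w : Nat) : Int) + 1) 1 ++ [((w : Nat) : Int) + 1] := by
      have h := PySem.List.pyRange_one_succ_right (a := 1) (b := ((w : Nat) : Int) + 1) hb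
      have hc : (((w + 1 : Nat) : Int) + 1) = (((w : Nat) : Int) + 1) + 1 := by push_cast; ring
      rw [hc, h]
    rw [hsplit, List.foldl_append, ih]
    simp only [List.foldl_cons, List.foldl_nil]
    have hidx : ((w : Nat) : Int) + 1 - 1 = ((w : Nat) : Int) := by ring
    have hget : PySem.List.pyGetD cl (((w : Nat) : Int) + 1 - 1) 0 = cntF a w := by
      rw [hidx, PySem.List.pyGetD_natCast, hcl w]
    rw [hget]
    have hval : (ncF a w + cntF a w) <<< (1 : Nat) = ncF a (w + 1) := by
      rw [Int.shiftLeft_eq]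
      simp [ncF]
    rw [hval]
    rw [List.range_succ (n := w + 1), List.map_append]
    simp


-- A's output loop: emits the spec value for each symbol, maintaining the table
theorem final_fold (a : List Int) (M : Int) (hM : ∀ x ∈ a, 0 ≤ x ∧ x ≤ M) :
    ∀ (r p out q : List Int), a = p ++ r → q.length = M.toNat + 1 →
    (∀ j : Nat, j ≤ M.toNat →
      q.getD j 0 = ncF a j + (if j = 0 then 0 else (p.count (j : Int) : Int))) →
    (r.foldl (fun (st : List Int × List Int) x =>
        (st.1 ++ [PySem.List.pyGetD st.2 x 0],
         if x > 0 then PySem.List.pySetD st.2 x (PySem.List.pyGetD st.2 x 0 + 1) else st.2))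
      (out, q)).1 = out ++ specGo a p r := by
  intro r
  induction r with
  | nil => intro p out q _ _ _; simp [specGo]
  | cons x r' ihr =>
    intro p out q happ hqlen hq
    have hx : x ∈ a := by rw [happ]; simp
    obtain ⟨hx0, hxM⟩ := hM x hx
    have hxn : x.toNat ≤ M.toNat := by omega
    have hgq : ∀ (q' : List Int), PySem.List.pyGetD q' x 0 = q'.getD x.toNat 0 := by
      intro q'
      rw [show x = ((x.toNat : Nat) : Int) from by omega, PySem.List.pyGetD_natCast]
      simp [max_eq_left hx0]
    simp only [List.foldl_cons, hgq]
    have hval : q.getD x.toNat 0 = specAt a p x := by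
      rw [hq x.toNat hxn]
      by_cases hpos : 0 < x
      · have hxt : x.toNat ≠ 0 := by omega
        have hcast : ((x.toNat : Nat) : Int) = x := by omega
        simp [specAt, hpos, hxt, hcast]
      · have hx00 : x = 0 := by omega
        subst hx00
        simp [specAt, ncF]
    by_cases hpos : x > 0
    · have hset : PySem.List.pySetD q x (q.getD x.toNat 0 + 1)
          = q.set x.toNat (q.getD x.toNat 0 + 1) := by
        rw [show x = ((x.toNat : Nat) : Int) from by omega, PySem.List.pySetD_natCast]
        simp [max_eq_left hx0]
      rw [if_pos hpos, hset]
      have hres := ihr (p ++ [x]) (out ++ [q.getD x.toNat 0])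
        (q.set x.toNat (q.getD x.toNat 0 + 1))
        (by rw [happ]; simp) (by simp [hqlen]) ?_
      · rw [hres, hval]
        simp [specGo]
      · intro j hj
        by_cases hjx : j = x.toNat
        · subst hjx
          rw [getD_set_self q _ _ (by omega)]
          have hjt : x.toNat ≠ 0 := by omega
          have hcast : ((x.toNat : Nat) : Int) = x := by omega
          rw [hq x.toNat hxn]
          simp [hjt, hcast, List.count_append]
          ring
        · rw [getD_set_ne q _ _ _ hjx, hq j hj]
          by_cases hj0 : j = 0
          · simp [hj0]
          · have hne : x ≠ ((j : Nat) : Int) := by omega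
            simp [hj0, List.count_append, hne]
    · have hx00 : x = 0 := by omega
      rw [if_neg hpos]
      have hres := ihr (p ++ [x]) (out ++ [q.getD x.toNat 0]) q
        (by rw [happ]; simp) hqlen ?_
      · rw [hres, hval]
        simp [specGo]
      · intro j hj
        rw [hq j hj]
        by_cases hj0 : j = 0
        · simp [hj0]
        · have hne : x ≠ ((j : Nat) : Int) := by omega
          have hc0 : List.count ((j : Nat) : Int) [(0:Int)] = 0 := by
            simp [List.count_singleton]
            omega
          simp [hj0, List.count_append, hx00, hc0]

theorem A_eq_spec (a : List Int) (h : Pre_converterComprimentos a) :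
    converterComprimentos a = specGo a [] a := by
  obtain ⟨hne, hnn⟩ := h
  obtain ⟨M, hmax⟩ : ∃ M, PySem.List.max? a (fun x => x) = some M := by
    obtain ⟨x, t, rfl⟩ := List.exists_cons_of_ne_nil hne
    exact ⟨t.foldl max x, PySem.List.max?_id_cons x t⟩
  have hMmem : M ∈ a := PySem.List.max?_mem hmax
  have hMmax : ∀ y ∈ a, y ≤ M := PySem.List.max?_isMax hmax
  have hM0 : 0 ≤ M := hnn M hMmem
  have hMt : ((M + 1).toNat : Int) = M + 1 := by omega
  -- the histogram
  have hhist := hist_foldl a (List.replicate (M + 1).toNat (0 : Int))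
    (by intro x hx
        refine ⟨hnn x hx, ?_⟩
        have := hMmax x hx
        simp [hMt]
        omega)
  set C := a.foldl (fun c v => PySem.List.pySetD c v (PySem.List.pyGetD c v 0 + 1))
    (List.replicate (M + 1).toNat (0 : Int)) with hC
  obtain ⟨hClen, hCj⟩ := hhist
  have hClen' : C.length = M.toNat + 1 := by
    rw [hClen]; simp; omega
  have hset0 : PySem.List.pySetD C 0 0 = C.set 0 0 := by
    rw [show (0 : Int) = ((0 : Nat) : Int) from rfl, PySem.List.pySetD_natCast]
  have hcnt : ∀ j : Nat, (C.set 0 0).getD j 0 = cntF a j := by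
    intro j
    by_cases hj0 : j = 0
    · subst hj0
      rw [getD_set_self C _ _ (by omega)]
      simp [cntF]
    · rw [getD_set_ne C _ _ _ hj0, hCj j]
      have hrep : (List.replicate (M + 1).toNat (0 : Int)).getD j 0 = 0 := by
        simp [List.getD_eq_getElem?_getD, List.getElem?_replicate]
        split <;> simp
      rw [hrep]
      simp [cntF, hj0]
  have hpf := prox_fold a (C.set 0 0) hcnt M.toNat
  rw [show ((M.toNat : Nat) : Int) + 1 = M + 1 from by omega] at hpf
  unfold converterComprimentos
  rw [hmax]
  simp only [← hC, hset0, hpf]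
  rw [PySem.List.foldl_pyRange_zero_pyGetD' a 0
    (fun (st : List Int × List Int) comp =>
      (st.1 ++ [PySem.List.pyGetD st.2 comp 0],
       if comp > 0 then PySem.List.pySetD st.2 comp (PySem.List.pyGetD st.2 comp 0 + 1)
       else st.2))
    (([], (List.range (M.toNat + 1)).map (ncF a)))]
  have hff := final_fold a M (fun x hx => ⟨hnn x hx, hMmax x hx⟩) a [] []
    ((List.range (M.toNat + 1)).map (ncF a)) rfl (by simp) ?_
  · rw [hff]; simp
  · intro j hj
    have : ((List.range (M.toNat + 1)).map (ncF a)).getD j 0 = ncF a j := by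
      simp [List.getD_eq_getElem?_getD, Nat.lt_succ_of_le hj]
    rw [this]
    simp

-- length and elementwise characterisation of the spec list
theorem specGo_length (a : List Int) : ∀ (r p : List Int), (specGo a p r).length = r.length := by
  intro r
  induction r with
  | nil => intro p; simp [specGo]
  | cons x r' ih => intro p; simp [specGo, ih]

theorem specGo_getD (a : List Int) : ∀ (r p : List Int) (i : Nat), i < r.length →
    (specGo a p r).getD i 0 = specAt a (p ++ r.take i) (r.getD i 0) := by
  intro r
  induction r with
  | nil => intro p i h; simp at h
  | cons x r' ih =>
    intro p i h
    cases i with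
    | zero => simp [specGo]
    | succ i' =>
      have := ih (p ++ [x]) i' (by simpa using h)
      simp only [specGo, List.getD_cons_succ, List.take_succ_cons, this]
      simp

-- B's inner pass: assigns consecutive codes to the occurrences of one length
theorem inner_fold (l : Int) (_hl : 0 < l) : ∀ (r : List Int) (s : Nat) (q : List Int) (c : Int),
    s + r.length ≤ q.length →
    (((PySem.List.enumerate r ((s : Nat) : Int)).foldl
        (fun (p : List Int × Int) ix =>
          if ix.2 == l then (PySem.List.pySetD p.1 ix.1 p.2, p.2 + 1) else p)
        (q, c)).2 = c + (r.count l : Int) ∧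
     ((PySem.List.enumerate r ((s : Nat) : Int)).foldl
        (fun (p : List Int × Int) ix =>
          if ix.2 == l then (PySem.List.pySetD p.1 ix.1 p.2, p.2 + 1) else p)
        (q, c)).1.length = q.length ∧
     ∀ i : Nat, ((PySem.List.enumerate r ((s : Nat) : Int)).foldl
        (fun (p : List Int × Int) ix =>
          if ix.2 == l then (PySem.List.pySetD p.1 ix.1 p.2, p.2 + 1) else p)
        (q, c)).1.getD i 0
      = if s ≤ i ∧ i < s + r.length ∧ r.getD (i - s) 0 = l
        then c + ((r.take (i - s)).count l : Int) else q.getD i 0) := by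
  intro r
  induction r with
  | nil =>
    intro s q c hlen
    refine ⟨by simp [PySem.List.enumerate_nil], by simp [PySem.List.enumerate_nil], ?_⟩
    intro i
    simp [PySem.List.enumerate_nil]
    intro h1 h2
    omega
  | cons x r' ih =>
    intro s q c hlen
    rw [PySem.List.enumerate_cons]
    simp only [List.foldl_cons]
    have hstep : (if x == l then (PySem.List.pySetD q ((s : Nat) : Int) c, c + 1) else (q, c))
        = (if x = l then q.set s c else q, if x = l then c + 1 else c) := by
      by_cases hx : x = l
      · simp [hx, PySem.List.pySetD_natCast]
      · simp [hx]
    have hcast : ((s : Nat) : Int) + 1 = (((s + 1 : Nat)) : Int) := by push_cast; ring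
    rw [hstep, hcast]
    have hlen1 : (if x = l then q.set s c else q).length = q.length := by
      split <;> simp
    obtain ⟨ih1, ih2, ih3⟩ := ih (s + 1) (if x = l then q.set s c else q) (if x = l then c + 1 else c)
      (by rw [hlen1]; simp at hlen; omega)
    refine ⟨?_, by rw [ih2, hlen1], ?_⟩
    · rw [ih1]
      by_cases hx : x = l
      · simp [hx]
        ring
      · simp [hx]
    · intro i
      rw [ih3 i]
      by_cases hcond : s ≤ i ∧ i < s + (x :: r').length ∧ (x :: r').getD (i - s) 0 = l
      · rw [if_pos hcond]
        obtain ⟨h1, h2, h3⟩ := hcond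
        by_cases hi : i = s
        · subst hi
          have hx : x = l := by simpa [Nat.sub_self] using h3
          have hcond' : ¬ (i + 1 ≤ i ∧ i < i + 1 + r'.length ∧ r'.getD (i - (i + 1)) 0 = l) := by
            omega
          rw [if_neg hcond']
          have hql : i < q.length := by simp at hlen; omega
          simp [hx, hql]
        · have hcond' : s + 1 ≤ i ∧ i < s + 1 + r'.length ∧ r'.getD (i - (s + 1)) 0 = l := by
            refine ⟨by omega, by simp at h2 ⊢; omega, ?_⟩
            have hsub : i - s = (i - (s + 1)) + 1 := by omega
            rw [hsub] at h3
            simpa using h3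
          rw [if_pos hcond']
          have hsub : i - s = (i - (s + 1)) + 1 := by omega
          rw [hsub, List.take_succ_cons]
          by_cases hx : x = l
          · simp [hx]
            ring
          · simp [hx]
      · have hcond' : ¬ (s + 1 ≤ i ∧ i < s + 1 + r'.length ∧ r'.getD (i - (s + 1)) 0 = l) := by
          rintro ⟨a1, a2, a3⟩
          apply hcond
          refine ⟨by omega, by simp at a2 ⊢; omega, ?_⟩
          have hsub : i - s = (i - (s + 1)) + 1 := by omega
          rw [hsub]
          simpa using a3
        rw [if_neg hcond', if_neg hcond]
        by_cases hx : x = l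
        · have his : i ≠ s := by
            intro hi
            subst hi
            exact hcond ⟨le_refl _, by simp, by simpa [Nat.sub_self] using hx⟩
          simp [hx, List.getElem?_set_ne (by omega : s ≠ i)]
        · simp [hx]

-- B's outer pass over the sorted distinct positive lengths
theorem outer_fold (a : List Int) (_hnn : ∀ x ∈ a, 0 ≤ x) :
    ∀ (ls q : List Int) (c prev : Int),
    ls.Pairwise (· < ·) →
    (∀ l ∈ ls, l ∈ a ∧ prev < l) →
    (∀ x ∈ a, prev < x → x ∈ ls) →
    0 ≤ prev →
    c = ncF a prev.toNat + cntF a prev.toNat →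
    q.length = a.length →
    (∀ i : Nat, q.getD i 0 = if a.getD i 0 ≤ prev then specAt a (a.take i) (a.getD i 0) else 0) →
    ((ls.foldl (fun (st : List Int × Int × Int) l =>
        (((PySem.List.enumerate a 0).foldl
            (fun (p : List Int × Int) ix =>
              if ix.2 == l then (PySem.List.pySetD p.1 ix.1 p.2, p.2 + 1) else p)
            (st.1, st.2.1 <<< (l - st.2.2).toNat)).1,
         ((PySem.List.enumerate a 0).foldl
            (fun (p : List Int × Int) ix =>
              if ix.2 == l then (PySem.List.pySetD p.1 ix.1 p.2, p.2 + 1) else p)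
            (st.1, st.2.1 <<< (l - st.2.2).toNat)).2, l))
      (q, c, prev)).1.length = a.length ∧
     ∀ i : Nat, (ls.foldl (fun (st : List Int × Int × Int) l =>
        (((PySem.List.enumerate a 0).foldl
            (fun (p : List Int × Int) ix =>
              if ix.2 == l then (PySem.List.pySetD p.1 ix.1 p.2, p.2 + 1) else p)
            (st.1, st.2.1 <<< (l - st.2.2).toNat)).1,
         ((PySem.List.enumerate a 0).foldl
            (fun (p : List Int × Int) ix =>
              if ix.2 == l then (PySem.List.pySetD p.1 ix.1 p.2, p.2 + 1) else p)
            (st.1, st.2.1 <<< (l - st.2.2).toNat)).2, l))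
      (q, c, prev)).1.getD i 0 = specAt a (a.take i) (a.getD i 0)) := by
  intro ls
  induction ls with
  | nil =>
    intro q c prev _ _ hcov hprev _ hqlen hq
    refine ⟨by simpa using hqlen, ?_⟩
    intro i
    simp only [List.foldl_nil]
    rw [hq i]
    by_cases hle : a.getD i 0 ≤ prev
    · rw [if_pos hle]
    · rw [if_neg hle]
      by_cases hi : i < a.length
      · exfalso
        have hmem : a.getD i 0 ∈ a := by
          rw [List.getD_eq_getElem a 0 hi]
          exact List.getElem_mem hi
        exact absurd (hcov _ hmem (by omega)) (List.not_mem_nil)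
      · rw [getD_oob a i (by omega)]
        simp [specAt]
  | cons l ls' ih =>
    intro q c prev hpair hmem hcov hprev hc hqlen hq
    obtain ⟨hla, hprevl⟩ := hmem l (List.mem_cons_self)
    have hl0 : 0 < l := lt_of_le_of_lt hprev hprevl
    have hhead : ∀ y ∈ ls', l < y := (List.pairwise_cons.mp hpair).1
    have hpair' : ls'.Pairwise (· < ·) := (List.pairwise_cons.mp hpair).2
    have habsent : ∀ j : Nat, prev.toNat < j → j < l.toNat → cntF a j = 0 := by
      intro j h1 h2
      have hj0 : j ≠ 0 := by omega
      simp only [cntF, if_neg hj0]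
      rw [Int.natCast_eq_zero, List.count_eq_zero]
      intro hjmem
      have hjpos : prev < ((j : Nat) : Int) := by omega
      have := hcov _ hjmem hjpos
      rcases List.mem_cons.mp this with hjl | hjtail
      · omega
      · have := hhead _ hjtail
        omega
    have hjump := nc_jump a l.toNat prev.toNat (by omega) habsent
    have hcode : c <<< (l - prev).toNat = ncF a l.toNat := by
      rw [Int.shiftLeft_eq, hc, show (l - prev).toNat = l.toNat - prev.toNat from by omega,
        ← hjump]
    obtain ⟨hin1, hin2, hin3⟩ := inner_fold l hl0 a 0 q (c <<< (l - prev).toNat)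
      (by omega)
    simp only [List.foldl_cons, Nat.cast_zero] at *
    have hc1 : ncF a l.toNat + (a.count l : Int) = ncF a l.toNat + cntF a l.toNat := by
      have hlt : l.toNat ≠ 0 := by omega
      simp only [cntF, if_neg hlt]
      rw [show ((l.toNat : Nat) : Int) = l from by omega]
    refine ih _ _ _ hpair' ?_ ?_ (by omega) ?_ ?_ ?_
    · intro l' hl'
      exact ⟨(hmem l' (List.mem_cons_of_mem _ hl')).1, hhead l' hl'⟩
    · intro x hx hlx
      have := hcov x hx (by omega)
      rcases List.mem_cons.mp this with h | h
      · omega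
      · exact h
    · rw [hin1, hcode, hc1]
    · rw [hin2, hqlen]
    · intro i
      rw [hin3 i, hcode]
      by_cases hcnd : 0 ≤ i ∧ i < 0 + a.length ∧ a.getD (i - 0) 0 = l
      · rw [if_pos hcnd]
        obtain ⟨_, hilen, hieq⟩ := hcnd
        simp only [Nat.sub_zero] at hieq
        rw [if_pos (by rw [hieq])]
        rw [show specAt a (a.take i) (a.getD i 0) = ncF a (a.getD i 0).toNat + ((a.take i).count (a.getD i 0) : Int) from by
          simp only [specAt]
          rw [if_pos (by rw [hieq]; exact hl0)]]
        rw [hieq]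
        simp
      · rw [if_neg hcnd, hq i]
        by_cases hi : i < a.length
        · have hane : a.getD i 0 ≠ l := by
            intro he
            exact hcnd ⟨by omega, by omega, by simpa using he⟩
          have hmem' : a.getD i 0 ∈ a := by
            rw [List.getD_eq_getElem a 0 hi]
            exact List.getElem_mem hi
          by_cases hle : a.getD i 0 ≤ prev
          · rw [if_pos hle, if_pos (by omega)]
          · have hpos : prev < a.getD i 0 := by omega
            have := hcov _ hmem' hpos
            rcases List.mem_cons.mp this with h | h
            · exact absurd h hane
            · have := hhead _ h
              rw [if_neg hle, if_neg (by omega)]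
        · rw [getD_oob a i (by omega)]
          rw [if_pos (by omega), if_pos (by omega)]

theorem B_eq_spec (a : List Int) (h : Pre_converterComprimentos a) :
    converterComprimentos_alt a = specGo a [] a := by
  obtain ⟨-, hnn⟩ := h
  have hpair := PySem.List.sorted_ofList_pairwise_lt (xs := a.filter (fun x => decide (0 < x)))
  have hmemiff : ∀ l : Int,
      l ∈ PySem.List.sorted (PySem.Set.ofList (a.filter (fun x => decide (0 < x))))
          (fun x => x) false ↔ (l ∈ a ∧ 0 < l) := by
    intro l
    rw [PySem.List.mem_sorted, PySem.Set.mem_ofList, List.mem_filter]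
    simp
  obtain ⟨hL, hV⟩ := outer_fold a hnn
    (PySem.List.sorted (PySem.Set.ofList (a.filter (fun x => decide (0 < x)))) (fun x => x) false)
    (List.replicate a.length 0) 0 0
    hpair
    (fun l hl => (hmemiff l).mp hl)
    (fun x hx hpx => (hmemiff x).mpr ⟨hx, hpx⟩)
    le_rfl
    (by simp [ncF, cntF])
    (by simp)
    (by intro i
        have hrep : (List.replicate a.length (0 : Int)).getD i 0 = 0 := by
          simp [List.getD_eq_getElem?_getD, List.getElem?_replicate]
          split <;> simp
        rw [hrep]
        split
        · next hcnd =>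
          simp only [specAt]
          rw [if_neg (by omega)]
        · rfl)
  have hport : converterComprimentos_alt a
      = ((PySem.List.sorted (PySem.Set.ofList (a.filter (fun x => decide (0 < x))))
            (fun x => x) false).foldl (fun (st : List Int × Int × Int) l =>
        (((PySem.List.enumerate a 0).foldl
            (fun (p : List Int × Int) ix =>
              if ix.2 == l then (PySem.List.pySetD p.1 ix.1 p.2, p.2 + 1) else p)
            (st.1, st.2.1 <<< (l - st.2.2).toNat)).1,
         ((PySem.List.enumerate a 0).foldl
            (fun (p : List Int × Int) ix =>
              if ix.2 == l then (PySem.List.pySetD p.1 ix.1 p.2, p.2 + 1) else p)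
            (st.1, st.2.1 <<< (l - st.2.2).toNat)).2, l))
      (List.replicate a.length 0, 0, 0)).1 := rfl
  rw [hport]
  apply List.ext_getElem (by rw [hL, specGo_length])
  intro i h1 h2
  rw [← List.getD_eq_getElem _ 0 h1, ← List.getD_eq_getElem _ 0 h2, hV i,
    specGo_getD a a [] i (by rw [hL] at h1; exact h1)]
  simp

-- ===== VERDICT (by name: the statement is the Claim_ definition above) =====
theorem converterComprimentos_spec : Claim_equal_converterComprimentos := by
  intro a _ h
  unfold Spec_converterComprimentos
  rw [A_eq_spec a h, B_eq_spec a h]
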